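-- pv_equiv track=rewrite | github.com/laze44/distIR | mercury/search/search.py | enumerate_mesh_shapes
-- ===== SOURCE A (Python) =====
-- from typing import Callable, Dict, Iterator, List, Optional, Tuple
--
-- def enumerate_mesh_shapes(
--     mesh_size: int, max_dim: int, current_shape: List[int] = None, remaining: int = None
-- ) -> Iterator[Tuple[int, ...]]:
--     """
--     enumerate all possible device mesh shapes.
--     Parameters
--     ----------
--     mesh_size : int
--         The size of the original 1D mesh
--     max_dim : int
--         The maximum number of dimensions allowed
--     current_shape : List[int], optional
--         The current shape being constructed, used for recursion
--     remaining : int, optional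
--         The remaining size to be allocated, used for recursion
--     Yields
--     -------
--     Tuple[int, ...]
--         A possible mesh shape, e.g., (4,), (2,2), (2,2,2), etc.
--     """
--     if current_shape is None:
--         current_shape = []
--         remaining = mesh_size
--
--     # base case: if the current shape has reached max_dim but there is still remaining size, return
--     if len(current_shape) >= max_dim and remaining > 1:
--         return
--
--     # if no remaining size to allocate, yield the current shape
--     if remaining == 1:
--         yield tuple(current_shape)
--         return
--     elif remaining < 1:
--         return
--
--     # try all possible factors
--     for factor in range(2, remaining + 1):
--         if remaining % factor == 0:
--             # for each factor, recursively enumerate the remaining size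
--             for shape in enumerate_mesh_shapes(
--                 mesh_size, max_dim, current_shape + [factor], remaining // factor
--             ):
--                 yield shape
-- ===== SOURCE B (Python) =====
-- def _divisors_from_2(n):
--     # divisors of n in [2, n], ascending, by trial division up to sqrt(n)
--     small, large = [], []
--     i = 2
--     while i * i <= n:
--         if n % i == 0:
--             small.append(i)
--             if i * i != n:
--                 large.append(n // i)
--         i += 1
--     return small + list(reversed(large)) + [n]
--
-- def _shapes(mesh_size, max_dim, prefix, rem):
--     if rem == 1:
--         yield prefix
--         return
--     if rem < 1 or len(prefix) >= max_dim:
--         return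
--     for f in _divisors_from_2(rem):
--         yield from _shapes(mesh_size, max_dim, prefix + (f,), rem // f)
--
-- def enumerate_mesh_shapes(mesh_size, max_dim, current_shape=None, remaining=None):
--     if current_shape is None:
--         current_shape, remaining = [], mesh_size
--     return _shapes(mesh_size, max_dim, tuple(current_shape), remaining)
-- ===== Notes on version B (the rewrite author's own statement) =====
-- stated objective: alternative
-- what changed: A scans every candidate factor 2..remaining at each recursion node; B enumerates only the divisors of remaining by trial division up to sqrt(remaining) (small divisors plus their reversed cofactors, ascending) and recurses over that list.
import Mathlib
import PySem

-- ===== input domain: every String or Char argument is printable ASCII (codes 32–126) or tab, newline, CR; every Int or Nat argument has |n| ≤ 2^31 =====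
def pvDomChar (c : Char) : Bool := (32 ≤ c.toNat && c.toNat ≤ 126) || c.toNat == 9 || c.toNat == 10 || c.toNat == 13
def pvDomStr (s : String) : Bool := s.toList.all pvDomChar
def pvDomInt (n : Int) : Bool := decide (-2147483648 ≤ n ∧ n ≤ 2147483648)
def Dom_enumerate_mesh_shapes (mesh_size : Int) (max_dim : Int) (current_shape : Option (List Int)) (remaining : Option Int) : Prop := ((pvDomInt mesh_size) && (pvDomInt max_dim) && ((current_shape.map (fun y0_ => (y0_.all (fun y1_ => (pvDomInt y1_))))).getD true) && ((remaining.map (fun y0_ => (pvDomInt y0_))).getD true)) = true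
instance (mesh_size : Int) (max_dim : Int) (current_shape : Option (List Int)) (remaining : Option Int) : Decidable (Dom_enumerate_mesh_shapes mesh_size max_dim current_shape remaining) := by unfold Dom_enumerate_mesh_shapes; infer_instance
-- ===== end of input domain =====

-- B replaces A's per-node scan of all candidate factors 2..remaining by trial-division divisor
-- enumeration up to √remaining (objective: alternative algorithm; overall speed not claimed).
-- Both are generators; equivalence is about the list of yielded tuples.

-- ===== PORT A =====
-- recursion depth is bounded by remaining (it at least halves each level); fuel is a totality
-- guard only and is never exhausted on the calls the wrappers make
def emsA (fuel : Nat) (mesh_size : Int) (max_dim : Int) (current_shape : List Int) (remaining : Int) : List (List Int) :=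
  match fuel with
  | 0 => []
  | f + 1 =>
    if (current_shape.length : Int) ≥ max_dim ∧ 1 < remaining then []
    else if remaining = 1 then [current_shape]
    else if remaining < 1 then []
    else
      (PySem.List.pyRange 2 (remaining + 1) 1).foldl
        (fun acc factor =>
          if PySem.Int.mod remaining factor = 0 then
            acc ++ emsA f mesh_size max_dim (current_shape ++ [factor]) (PySem.Int.floordiv remaining factor)
          else acc) []

def enumerate_mesh_shapes (mesh_size : Int) (max_dim : Int) (current_shape : Option (List Int)) (remaining : Option Int) : List (List Int) :=
  match current_shape, remaining with
  | none, _ => emsA (mesh_size.toNat + 1) mesh_size max_dim [] mesh_size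
  | some s, some r => emsA (r.toNat + 1) mesh_size max_dim s r
  | some _, none => []  -- Python raises TypeError here; excluded by Pre_

-- ===== PORT B =====
-- the while-loop of _divisors_from_2; terminates since i*i ≤ n forces i ≤ n
def divLoop (n : Int) (i : Int) (small : List Int) (large : List Int) : List Int × List Int :=
  if h : i * i ≤ n then
    if PySem.Int.mod n i = 0 then
      divLoop n (i + 1) (small ++ [i])
        (if i * i = n then large else large ++ [PySem.Int.floordiv n i])
    else divLoop n (i + 1) small large
  else (small, large)
termination_by (n + 1 - i).toNat
decreasing_by
  all_goals
    (have hi : i ≤ n := by nlinarith [sq_nonneg (2 * i - 1)]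
     omega)

def divisors_from_2 (n : Int) : List Int :=
  (divLoop n 2 [] []).1 ++ (divLoop n 2 [] []).2.reverse ++ [n]

def emsB (fuel : Nat) (mesh_size : Int) (max_dim : Int) (pre : List Int) (rem : Int) : List (List Int) :=
  match fuel with
  | 0 => []
  | f + 1 =>
    if rem = 1 then [pre]
    else if rem < 1 ∨ (pre.length : Int) ≥ max_dim then []
    else
      (divisors_from_2 rem).flatMap
        (fun fac => emsB f mesh_size max_dim (pre ++ [fac]) (PySem.Int.floordiv rem fac))

def enumerate_mesh_shapes_alt (mesh_size : Int) (max_dim : Int) (current_shape : Option (List Int)) (remaining : Option Int) : List (List Int) :=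
  match current_shape, remaining with
  | none, _ => emsB (mesh_size.toNat + 1) mesh_size max_dim [] mesh_size
  | some s, some r => emsB (r.toNat + 1) mesh_size max_dim s r
  | some _, none => []  -- Python raises TypeError here; excluded by Pre_

-- ===== PRECONDITION & SPEC =====
-- Pre_ excludes only the inputs where an explicit current_shape comes with remaining=None:
-- there both Pythons raise TypeError (None compared with int).
def Pre_enumerate_mesh_shapes (mesh_size : Int) (max_dim : Int) (current_shape : Option (List Int)) (remaining : Option Int) : Prop :=
  current_shape = none ∨ remaining ≠ none
instance (mesh_size : Int) (max_dim : Int) (current_shape : Option (List Int)) (remaining : Option Int) : Decidable (Pre_enumerate_mesh_shapes mesh_size max_dim current_shape remaining) := by unfold Pre_enumerate_mesh_shapes; infer_instance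

def pvWitness_enumerate_mesh_shapes : Int × Int × Option (List Int) × Option Int := (12, 3, none, none)

def Spec_enumerate_mesh_shapes (mesh_size : Int) (max_dim : Int) (current_shape : Option (List Int)) (remaining : Option Int) (out : List (List Int)) : Prop := out = enumerate_mesh_shapes_alt mesh_size max_dim current_shape remaining
instance (mesh_size : Int) (max_dim : Int) (current_shape : Option (List Int)) (remaining : Option Int) (out : List (List Int)) : Decidable (Spec_enumerate_mesh_shapes mesh_size max_dim current_shape remaining out) := by unfold Spec_enumerate_mesh_shapes; infer_instance

-- ===== CLAIM (what is proved, stated in full; the proofs are below) =====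
def Claim_equal_enumerate_mesh_shapes : Prop := ∀ (mesh_size : Int) (max_dim : Int) (current_shape : Option (List Int)) (remaining : Option Int), Dom_enumerate_mesh_shapes mesh_size max_dim current_shape remaining → Pre_enumerate_mesh_shapes mesh_size max_dim current_shape remaining → Spec_enumerate_mesh_shapes mesh_size max_dim current_shape remaining (enumerate_mesh_shapes mesh_size max_dim current_shape remaining)

-- ===== LEMMAS AND PROOFS =====

-- ghost (cons-style) image of divLoop's small-divisor accumulator
def divD (n : Int) (i : Int) : List Int :=
  if h : i * i ≤ n then
    (if PySem.Int.mod n i = 0 then [i] else []) ++ divD n (i + 1)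
  else []
termination_by (n + 1 - i).toNat
decreasing_by
  have hi : i ≤ n := by nlinarith [sq_nonneg (2 * i - 1)]
  omega

lemma divLoop_eq (n : Int) : ∀ (m : Nat) (i : Int), (n + 1 - i).toNat = m → ∀ s l : List Int,
    divLoop n i s l =
      (s ++ divD n i,
       l ++ ((divD n i).filter (fun d => decide (d * d ≠ n))).map (fun d => PySem.Int.floordiv n d)) := by
  intro m
  induction m using Nat.strong_induction_on with
  | _ m IH =>
    intro i hm s l
    rw [divLoop, divD]
    split_ifs with h hmod hsq
    · have hi : i ≤ n := by nlinarith [sq_nonneg (2 * i - 1)]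
      rw [IH (n + 1 - (i + 1)).toNat (by omega) (i + 1) rfl]
      simp [hsq]
    · have hi : i ≤ n := by nlinarith [sq_nonneg (2 * i - 1)]
      rw [IH (n + 1 - (i + 1)).toNat (by omega) (i + 1) rfl]
      simp [hsq]
    · have hi : i ≤ n := by nlinarith [sq_nonneg (2 * i - 1)]
      rw [IH (n + 1 - (i + 1)).toNat (by omega) (i + 1) rfl]
      simp [hmod]
    · simp

lemma mem_divD (n : Int) : ∀ (m : Nat) (i : Int), 1 ≤ i → (n + 1 - i).toNat = m → ∀ x : Int,
    (x ∈ divD n i ↔ i ≤ x ∧ x * x ≤ n ∧ PySem.Int.mod n x = 0) := by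
  intro m
  induction m using Nat.strong_induction_on with
  | _ m IH =>
    intro i hi1 hm x
    rw [divD]
    split_ifs with h hmod
    · have hi : i ≤ n := by nlinarith [sq_nonneg (2 * i - 1)]
      rw [List.mem_append,
        IH (n + 1 - (i + 1)).toNat (by omega) (i + 1) (by omega) rfl]
      simp only [List.mem_singleton]
      constructor
      · rintro (rfl | ⟨h1, h2, h3⟩)
        · exact ⟨le_refl _, h, hmod⟩
        · exact ⟨by omega, h2, h3⟩
      · rintro ⟨h1, h2, h3⟩
        rcases eq_or_lt_of_le h1 with rfl | hlt
        · exact Or.inl rfl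
        · exact Or.inr ⟨by omega, h2, h3⟩
    · have hi : i ≤ n := by nlinarith [sq_nonneg (2 * i - 1)]
      rw [List.nil_append,
        IH (n + 1 - (i + 1)).toNat (by omega) (i + 1) (by omega) rfl]
      constructor
      · rintro ⟨h1, h2, h3⟩; exact ⟨by omega, h2, h3⟩
      · rintro ⟨h1, h2, h3⟩
        rcases eq_or_lt_of_le h1 with rfl | hlt
        · exact absurd h3 hmod
        · exact ⟨by omega, h2, h3⟩
    · simp only [List.not_mem_nil, false_iff]
      rintro ⟨h1, h2, h3⟩
      have : i * i ≤ x * x := by nlinarith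
      omega

lemma pairwise_divD (n : Int) : ∀ (m : Nat) (i : Int), 1 ≤ i → (n + 1 - i).toNat = m →
    (divD n i).Pairwise (· < ·) := by
  intro m
  induction m using Nat.strong_induction_on with
  | _ m IH =>
    intro i hi1 hm
    rw [divD]
    split_ifs with h hmod
    · have hi : i ≤ n := by nlinarith [sq_nonneg (2 * i - 1)]
      have htail : (divD n (i + 1)).Pairwise (· < ·) :=
        IH (n + 1 - (i + 1)).toNat (by omega) (i + 1) (by omega) rfl
      refine List.pairwise_append.2 ⟨List.pairwise_singleton _ _, htail, ?_⟩
      intro a ha b hb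
      have hai : a = i := List.mem_singleton.1 ha
      have := (mem_divD n (n + 1 - (i + 1)).toNat (i + 1) (by omega) rfl b).1 hb
      omega
    · have hi : i ≤ n := by nlinarith [sq_nonneg (2 * i - 1)]
      rw [List.nil_append]
      exact IH (n + 1 - (i + 1)).toNat (by omega) (i + 1) (by omega) rfl
    · exact List.Pairwise.nil

lemma cofactor_mul {n d : Int} (hd : d ∣ n) : d * (n / d) = n := by
  rcases eq_or_ne d 0 with rfl | h0
  · rcases hd with ⟨c, hc⟩; simp_all
  · rw [mul_comm]; exact Int.ediv_mul_cancel hd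

lemma divisors_eq_filter {n : Int} (hn : 2 ≤ n) :
    divisors_from_2 n
      = (PySem.List.pyRange 2 (n + 1) 1).filter (fun f => decide (PySem.Int.mod n f = 0)) := by
  have hloop := divLoop_eq n (n + 1 - 2).toNat 2 rfl [] []
  have memD : ∀ x : Int, x ∈ divD n 2 ↔ 2 ≤ x ∧ x * x ≤ n ∧ PySem.Int.mod n x = 0 :=
    mem_divD n (n + 1 - 2).toNat 2 (by omega) rfl
  have pwD : (divD n 2).Pairwise (· < ·) := pairwise_divD n (n + 1 - 2).toNat 2 (by omega) rfl
  set D := divD n 2 with hD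
  set P := D.filter (fun d => decide (d * d ≠ n)) with hP
  set L := P.map (fun d => PySem.Int.floordiv n d) with hL
  -- basic facts about members of D
  have hDfacts : ∀ d ∈ D, 2 ≤ d ∧ d * d ≤ n ∧ d ∣ n := by
    intro d hd
    obtain ⟨h1, h2, h3⟩ := (memD d).1 hd
    exact ⟨h1, h2, (PySem.Int.mod_eq_zero_iff_dvd n d).1 h3⟩
  -- members of L: b = n/d with d ∈ D, d*d < n; then d < b, n < b*b, b < n, b ∣ n
  have hLfacts : ∀ b ∈ L, 2 ≤ b ∧ n < b * b ∧ b < n ∧ b ∣ n := by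
    intro b hb
    rw [hL, List.mem_map] at hb
    obtain ⟨d, hdP, rfl⟩ := hb
    rw [hP, List.mem_filter] at hdP
    obtain ⟨hdD, hdne⟩ := hdP
    obtain ⟨hd2, hdsq, hddvd⟩ := hDfacts d hdD
    have hdne' : d * d ≠ n := by simpa using hdne
    have hdsq' : d * d < n := lt_of_le_of_ne hdsq hdne'
    have hfd : PySem.Int.floordiv n d = n / d := PySem.Int.floordiv_eq_ediv_of_pos (by omega)
    rw [hfd]
    set b := n / d with hb
    have hmul : d * b = n := cofactor_mul hddvd
    have hdb : d < b := by nlinarith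
    have hb2 : 2 ≤ b := by omega
    refine ⟨hb2, by nlinarith, by nlinarith, ⟨d, by rw [← hmul]; ring⟩⟩
  -- n/· is strictly antitone on divisors in D
  have hPpw : P.Pairwise (· < ·) := pwD.filter _
  have hLpw : L.Pairwise (· > ·) := by
    rw [hL, List.pairwise_map]
    refine hPpw.imp_of_mem ?_
    intro a b ha hb hab
    rw [hP, List.mem_filter] at ha hb
    obtain ⟨ha2, hasq, hadvd⟩ := hDfacts a ha.1
    obtain ⟨hb2, hbsq, hbdvd⟩ := hDfacts b hb.1
    rw [PySem.Int.floordiv_eq_ediv_of_pos (show (0:Int) < a by omega),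
        PySem.Int.floordiv_eq_ediv_of_pos (show (0:Int) < b by omega)]
    have hma : a * (n / a) = n := cofactor_mul hadvd
    have hmb : b * (n / b) = n := cofactor_mul hbdvd
    have hqb : 1 ≤ n / b := by nlinarith
    nlinarith
  -- the full list is strictly sorted
  have hF : (D ++ L.reverse ++ [n]).Pairwise (· < ·) := by
    refine List.pairwise_append.2 ⟨List.pairwise_append.2 ⟨pwD, List.pairwise_reverse.2 hLpw, ?_⟩,
      List.pairwise_singleton _ _, ?_⟩
    · intro a ha b hb
      rw [List.mem_reverse] at hb
      obtain ⟨ha2, hasq, _⟩ := hDfacts a ha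
      obtain ⟨hb2, hbsq, _, _⟩ := hLfacts b hb
      nlinarith
    · intro a ha b hb
      rcases List.mem_singleton.1 hb with rfl
      rcases List.mem_append.1 ha with h | h
      · obtain ⟨ha2, hasq, _⟩ := hDfacts a h
        nlinarith
      · rw [List.mem_reverse] at h
        exact (hLfacts a h).2.2.1
  -- the right-hand side is strictly sorted
  have hR : ((PySem.List.pyRange 2 (n + 1) 1).filter
      (fun f => decide (PySem.Int.mod n f = 0))).Pairwise (· < ·) :=
    (PySem.List.pairwise_lt_pyRange_one 2 (n + 1)).filter _
  -- same membership
  have hmem : ∀ x : Int, x ∈ D ++ L.reverse ++ [n] ↔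
      x ∈ (PySem.List.pyRange 2 (n + 1) 1).filter (fun f => decide (PySem.Int.mod n f = 0)) := by
    intro x
    rw [List.mem_filter, PySem.List.mem_pyRange_one]
    simp only [List.mem_append, List.mem_reverse, List.mem_singleton, decide_eq_true_eq]
    constructor
    · rintro ((hx | hx) | hxe)
      · obtain ⟨hx2, hxsq, hxdvd⟩ := hDfacts x hx
        exact ⟨⟨hx2, by nlinarith⟩, (PySem.Int.mod_eq_zero_iff_dvd n x).2 hxdvd⟩
      · obtain ⟨hx2, _, hxn, hxdvd⟩ := hLfacts x hx
        exact ⟨⟨hx2, by omega⟩, (PySem.Int.mod_eq_zero_iff_dvd n x).2 hxdvd⟩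
      · rw [hxe]; exact ⟨⟨hn, by omega⟩, (PySem.Int.mod_eq_zero_iff_dvd n n).2 dvd_rfl⟩
    · rintro ⟨⟨hx2, hxlt⟩, hxmod⟩
      have hxdvd : x ∣ n := (PySem.Int.mod_eq_zero_iff_dvd n x).1 hxmod
      rcases le_or_gt (x * x) n with hsq | hsq
      · exact Or.inl (Or.inl ((memD x).2 ⟨hx2, hsq, hxmod⟩))
      · rcases eq_or_lt_of_le (show x ≤ n by omega) with hxeq | hxn
        · exact Or.inr hxeq
        · -- x is a large divisor: witness d = n / x
          refine Or.inl (Or.inr ?_)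
          rw [hL, List.mem_map]
          have hmul : x * (n / x) = n := cofactor_mul hxdvd
          set d := n / x with hd
          have hdx : d < x := by nlinarith
          have hd2 : 2 ≤ d := by nlinarith
          refine ⟨d, ?_, ?_⟩
          · rw [hP, List.mem_filter]
            refine ⟨(memD d).2 ⟨hd2, by nlinarith, (PySem.Int.mod_eq_zero_iff_dvd n d).2 ⟨x, by rw [← hmul]; ring⟩⟩, ?_⟩
            simp only [decide_eq_true_eq]
            nlinarith
          · have hmul' : d * x = n := by rw [← hmul]; ring
            rw [PySem.Int.floordiv_eq_ediv_of_pos (show (0:Int) < d by omega), ← hmul',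
                Int.mul_ediv_cancel_left x (show d ≠ 0 by omega)]
    -- conclude
  have hperm : List.Perm (D ++ L.reverse ++ [n])
      ((PySem.List.pyRange 2 (n + 1) 1).filter (fun f => decide (PySem.Int.mod n f = 0))) :=
    (List.perm_ext_iff_of_nodup (hF.imp fun h => ne_of_lt h) (hR.imp fun h => ne_of_lt h)).2 hmem
  have := hperm.eq_of_pairwise (fun a b _ _ h1 h2 => le_antisymm h1 h2) (hF.imp fun h => le_of_lt h) (hR.imp fun h => le_of_lt h)
  rw [divisors_from_2, hloop]
  simpa using this

lemma go_eq (fuel : Nat) (ms md : Int) : ∀ (p : List Int) (r : Int),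
    emsA fuel ms md p r = emsB fuel ms md p r := by
  induction fuel with
  | zero => intro p r; rfl
  | succ f IH =>
    intro p r
    by_cases h1 : r = 1
    · simp [emsA, emsB, h1]
    · by_cases h2 : r < 1
      · have h3 : ¬(1 < r) := by omega
        simp [emsA, emsB, h1, h2, h3]
      · by_cases h4 : (p.length : Int) ≥ md
        · have h5 : 1 < r := by omega
          simp [emsA, emsB, h1, h2, h4, h5]
        · have h2r : (2 : Int) ≤ r := by omega
          simp only [emsA, emsB, h1, h2, h4, if_false, false_and, and_false, false_or, or_false, if_neg h1]
          rw [PySem.List.foldl_ite_eq_foldl_filter, PySem.List.foldl_append_eq_flatMap,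
            divisors_eq_filter h2r]
          simp only [List.nil_append, IH]

-- ===== VERDICT (by name: the statement is the Claim_ definition above) =====
theorem enumerate_mesh_shapes_spec : Claim_equal_enumerate_mesh_shapes := by
  intro ms md cs rem _ _
  unfold Spec_enumerate_mesh_shapes enumerate_mesh_shapes enumerate_mesh_shapes_alt
  cases cs with
  | none => exact go_eq _ _ _ _ _
  | some s => cases rem with
    | none => rfl
    | some r => exact go_eq _ _ _ _ _
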